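-- pv_equiv track=rewrite | github.com/Tiloon/Object-Recognition | src/minMax.py | isMaxMin
-- ===== SOURCE A (Python) =====
-- def isMaxMin(elt, neighbours):
--     if elt > neighbours[0]:
--         for x in range(1, len(neighbours)):
--             if elt <= neighbours[x]:
--                 return 0
--     elif elt < neighbours[0]:
--         for x in range(1, len(neighbours)):
--             if elt >= neighbours[x]:
--                 return 0
--     else:
--         return 0
--     return 1
-- ===== SOURCE B (Python) =====
-- def isMaxMin(elt, neighbours):
--     # 1 iff elt is a strict maximum or a strict minimum of its neighbours.
--     return int(all(elt > x for x in neighbours) or all(elt < x for x in neighbours))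
-- ===== Notes on version B (the rewrite author's own statement) =====
-- stated objective: simpler
-- what changed: Replaced A's pick-a-direction-from-the-first-element branch with early-return scan by two independent all() checks (strictly greater than every neighbour, or strictly less than every neighbour), folded into one expression; Pre_ excludes only the empty list, where A raises IndexError and B returns 1.
import Mathlib
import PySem

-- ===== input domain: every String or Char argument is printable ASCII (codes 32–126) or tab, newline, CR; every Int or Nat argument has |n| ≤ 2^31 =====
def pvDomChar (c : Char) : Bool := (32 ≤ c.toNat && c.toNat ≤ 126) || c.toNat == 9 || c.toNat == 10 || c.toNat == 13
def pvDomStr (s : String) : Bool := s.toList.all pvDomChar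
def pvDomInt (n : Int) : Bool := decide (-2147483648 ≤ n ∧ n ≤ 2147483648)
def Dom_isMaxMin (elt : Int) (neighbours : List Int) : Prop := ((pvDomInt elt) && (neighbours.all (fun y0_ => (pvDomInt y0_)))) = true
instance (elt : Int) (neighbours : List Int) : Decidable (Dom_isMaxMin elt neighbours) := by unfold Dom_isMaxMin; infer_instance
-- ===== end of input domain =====

-- B replaces A's pick-a-direction-then-scan-with-early-return by two independent
-- "strictly greater than all" / "strictly less than all" checks (simpler).

-- ===== PORT A =====
-- scan of `for x in range(1, len(neighbours)): if elt <= neighbours[x]: return 0` (the tail of the list)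
def isMaxMinLoopGt (elt : Int) : List Int → Int
  | [] => 1
  | x :: xs => if elt ≤ x then 0 else isMaxMinLoopGt elt xs

def isMaxMinLoopLt (elt : Int) : List Int → Int
  | [] => 1
  | x :: xs => if elt ≥ x then 0 else isMaxMinLoopLt elt xs

def isMaxMin (elt : Int) (neighbours : List Int) : Int :=
  match neighbours with
  | [] => 0  -- unreachable under Pre_: Python A raises IndexError on neighbours[0]
  | h :: t =>
    if elt > h then isMaxMinLoopGt elt t
    else if elt < h then isMaxMinLoopLt elt t
    else 0

-- ===== PORT B =====
def isMaxMin_alt (elt : Int) (neighbours : List Int) : Int :=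
  if neighbours.all (fun x => decide (elt > x)) || neighbours.all (fun x => decide (elt < x))
  then 1 else 0

-- ===== PRECONDITION & SPEC =====
-- Pre_ excludes exactly the empty list, on which Python A raises IndexError (A indexes neighbours[0]); B returns 1 there.
def Pre_isMaxMin (elt : Int) (neighbours : List Int) : Prop := neighbours ≠ []
instance (elt : Int) (neighbours : List Int) : Decidable (Pre_isMaxMin elt neighbours) := by unfold Pre_isMaxMin; infer_instance
def pvWitness_isMaxMin : Int × List Int := (3, [1, 2])

def Spec_isMaxMin (elt : Int) (neighbours : List Int) (out : Int) : Prop := out = isMaxMin_alt elt neighbours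
instance (elt : Int) (neighbours : List Int) (out : Int) : Decidable (Spec_isMaxMin elt neighbours out) := by unfold Spec_isMaxMin; infer_instance

-- ===== CLAIM =====
def Claim_equal_isMaxMin : Prop := ∀ (elt : Int) (neighbours : List Int), Dom_isMaxMin elt neighbours → Pre_isMaxMin elt neighbours → Spec_isMaxMin elt neighbours (isMaxMin elt neighbours)

-- ===== LEMMAS AND PROOFS =====
theorem loopGt_eq (elt : Int) (t : List Int) :
    isMaxMinLoopGt elt t = if t.all (fun x => decide (elt > x)) then 1 else 0 := by
  induction t with
  | nil => simp [isMaxMinLoopGt]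
  | cons x xs ih =>
    simp only [isMaxMinLoopGt, List.all_cons, ih]
    by_cases h : elt ≤ x
    · have hx : ¬ x < elt := by omega
      simp [h, hx]
    · have hx : x < elt := by omega
      simp [h, hx]

theorem loopLt_eq (elt : Int) (t : List Int) :
    isMaxMinLoopLt elt t = if t.all (fun x => decide (elt < x)) then 1 else 0 := by
  induction t with
  | nil => simp [isMaxMinLoopLt]
  | cons x xs ih =>
    simp only [isMaxMinLoopLt, List.all_cons, ih]
    by_cases h : elt ≥ x
    · have hx : ¬ elt < x := by omega
      simp [h, hx]
    · have hx : elt < x := by omega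
      simp [h, hx]

-- ===== VERDICT =====
theorem isMaxMin_spec : Claim_equal_isMaxMin := by
  intro elt neighbours _ hpre
  unfold Spec_isMaxMin isMaxMin isMaxMin_alt
  match neighbours with
  | [] => exact absurd rfl hpre
  | h :: t =>
    simp only [List.all_cons]
    by_cases h1 : h < elt
    · have h2 : ¬ elt < h := by omega
      simp [h1, loopGt_eq, h2]
    · by_cases h2 : elt < h
      · have h3 : ¬ h < elt := h1
        simp [h1, h2, loopLt_eq]
      · simp [h1, h2]
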